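-- pv_equiv track=rewrite | github.com/JHyeok-Choi/Coding_Practice | 프로그래머스/2/42584. 주식가격/주식가격.py | solution
-- ===== SOURCE A (Python) =====
-- def solution(prices):
--     answer = [i for i in range(len(prices) -1, -1, -1)]
--     stk = []
--
--     for i in range(len(prices)):
--         while stk and prices[i] < prices[stk[-1]]:
--             answer[stk[-1]] = i - stk[-1]
--             stk.pop()
--         stk.append(i)
--
--     return answer
-- ===== SOURCE B (Python) =====
-- def solution(prices):
--     n = len(prices)
--     answer = [0] * n
--     for i in range(n):
--         for j in range(i + 1, n):
--             answer[i] += 1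
--             if prices[j] < prices[i]:
--                 break
--     return answer
-- ===== Notes on version B (the rewrite author's own statement) =====
-- stated objective: simpler
-- what changed: Replaced the monotonic-stack single pass (which retro-fills answers when a lower price pops earlier indices) with a plain double loop that, for each index, scans forward counting steps until the first strictly lower price.
import Mathlib
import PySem

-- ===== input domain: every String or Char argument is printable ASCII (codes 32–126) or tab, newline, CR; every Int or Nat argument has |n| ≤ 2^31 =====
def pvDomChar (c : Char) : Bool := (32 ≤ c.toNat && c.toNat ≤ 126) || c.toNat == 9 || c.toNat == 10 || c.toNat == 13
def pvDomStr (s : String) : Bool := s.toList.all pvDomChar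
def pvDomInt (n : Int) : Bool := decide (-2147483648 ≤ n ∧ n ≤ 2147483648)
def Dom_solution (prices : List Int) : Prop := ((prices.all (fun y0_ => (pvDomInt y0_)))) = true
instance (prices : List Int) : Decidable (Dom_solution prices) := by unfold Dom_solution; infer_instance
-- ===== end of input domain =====

-- B replaces A's monotonic-stack single pass by a plain forward-scanning double loop; simpler, not faster.

-- ===== PORT A =====
-- the inner `while stk and prices[i] < prices[stk[-1]]` loop; the stack is kept
-- with its TOP as the list head (Python's stk[-1]); every index stored is in
-- range, so prices[·] is ported as List.getD · 0
def aPop (prices : List Int) (i : Nat) : List Int → List Nat → List Int × List Nat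
  | answer, [] => (answer, [])
  | answer, t :: rest =>
    if prices.getD i 0 < prices.getD t 0 then
      aPop prices i (answer.set t ((i : Int) - (t : Int))) rest
    else (answer, t :: rest)

-- one iteration of `for i in range(len(prices))`
def aStep (prices : List Int) (st : List Int × List Nat) (i : Nat) : List Int × List Nat :=
  let p := aPop prices i st.1 st.2
  (p.1, i :: p.2)

def solution (prices : List Int) : List Int :=
  let n := prices.length
  -- answer = [i for i in range(len(prices)-1, -1, -1)] : entry k is n-1-k
  let answer := (List.range n).map (fun k : Nat => ((n : Int) - 1 - (k : Int)))
  ((List.range n).foldl (aStep prices) (answer, [])).1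

-- ===== PORT B =====
-- the inner `for j in range(i+1, n): answer[i] += 1; if prices[j] < prices[i]: break`
-- loop, run over the suffix prices[i+1:]
def bCount (x : Int) : List Int → Int
  | [] => 0
  | p :: rest => if p < x then 1 else 1 + bCount x rest

def solution_alt (prices : List Int) : List Int :=
  (List.range prices.length).map (fun i => bCount (prices.getD i 0) (prices.drop (i + 1)))

-- ===== PRECONDITION & SPEC =====
def Spec_solution (prices : List Int) (out : List Int) : Prop := out = solution_alt prices
instance (prices : List Int) (out : List Int) : Decidable (Spec_solution prices out) := by unfold Spec_solution; infer_instance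

-- ===== CLAIM (what is proved, stated in full; the proofs are below) =====
def Claim_equal_solution : Prop := ∀ (prices : List Int), Dom_solution prices → Spec_solution prices (solution prices)

-- ===== LEMMAS AND PROOFS =====

-- B's value for index k
def fval (prices : List Int) (k : Nat) : Int := bCount (prices.getD k 0) (prices.drop (k + 1))

-- "no price strictly below prices[k] occurs at a position in (k, i)"
def goodUpto (prices : List Int) (i k : Nat) : Prop :=
  ∀ j, k < j → j < i → prices.getD k 0 ≤ prices.getD j 0

-- invariant of A's outer loop before iteration i
def StkInv (prices : List Int) (i : Nat) (st : List Int × List Nat) : Prop :=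
  st.2.Pairwise (· > ·) ∧
  (∀ k, k ∈ st.2 ↔ (k < i ∧ goodUpto prices i k)) ∧
  st.1.length = prices.length ∧
  (∀ k, k < prices.length →
    st.1.getD k 0 =
      if k ∈ st.2 ∨ i ≤ k then ((prices.length : Int) - 1 - (k : Int)) else fval prices k)

theorem pvBCount_all_ge (x : Int) (l : List Int) (h : ∀ p ∈ l, ¬ p < x) :
    bCount x l = (l.length : Int) := by
  induction l with
  | nil => simp [bCount]
  | cons p rest ih =>
    simp only [bCount]
    rw [if_neg (h p (by simp))]
    rw [ih (fun q hq => h q (by simp [hq]))]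
    push_cast [List.length_cons]
    ring

theorem pvBCount_break (x : Int) (l : List Int) (m : Nat) (hm : m < l.length)
    (hpre : ∀ j, j < m → ¬ l.getD j 0 < x) (hhit : l.getD m 0 < x) :
    bCount x l = (m : Int) + 1 := by
  induction l generalizing m with
  | nil => simp at hm
  | cons p rest ih =>
    cases m with
    | zero =>
      have hp : p < x := by simpa [List.getD_cons_zero] using hhit
      simp [bCount, hp]
    | succ m =>
      have h0 : ¬ p < x := by simpa [List.getD_cons_zero] using hpre 0 (Nat.succ_pos m)
      simp only [bCount]
      rw [if_neg h0]
      rw [ih m (by simpa using hm)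
        (fun j hj => by simpa [List.getD_cons_succ] using hpre (j+1) (by omega))
        (by simpa [List.getD_cons_succ] using hhit)]
      push_cast
      ring

theorem pvGetD_drop (l : List Int) (a j : Nat) :
    (l.drop a).getD j 0 = l.getD (a + j) 0 := by
  rcases Nat.lt_or_ge (a + j) l.length with h | h
  · rw [List.getD_eq_getElem _ _ (by simp; omega), List.getD_eq_getElem _ _ h]
    simp
  · rw [List.getD_eq_default _ _ (by simp; omega), List.getD_eq_default _ _ h]

-- a popped index k (good up to i, prices[i] < prices[k]) gets B's value i - k
theorem pvFval_popped (prices : List Int) (i k : Nat) (hk : k < i) (hi : i < prices.length)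
    (hg : goodUpto prices i k) (hlt : prices.getD i 0 < prices.getD k 0) :
    fval prices k = (i : Int) - (k : Int) := by
  have hm : i - k - 1 < (prices.drop (k+1)).length := by simp; omega
  have hb := pvBCount_break (prices.getD k 0) (prices.drop (k+1)) (i - k - 1) hm
    (fun j hj => by
      rw [pvGetD_drop]
      exact not_lt.2 (hg (k+1+j) (by omega) (by omega)))
    (by rw [pvGetD_drop]
        have he : k + 1 + (i - k - 1) = i := by omega
        rw [he]; exact hlt)
  unfold fval
  rw [hb]
  have : ((i - k - 1 : Nat) : Int) = (i : Int) - (k : Int) - 1 := by omega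
  rw [this]; ring

-- an index still on the stack at the end keeps its initial value n-1-k, B's value too
theorem pvFval_survivor (prices : List Int) (k : Nat) (hk : k < prices.length)
    (hg : goodUpto prices prices.length k) :
    fval prices k = ((prices.length : Int) - 1 - (k : Int)) := by
  unfold fval
  rw [pvBCount_all_ge _ _ (fun p hp => by
    obtain ⟨j, hj, rfl⟩ := List.getElem_of_mem hp
    rw [← List.getD_eq_getElem _ 0 hj, pvGetD_drop]
    have hj' : j < prices.length - (k+1) := by simpa using hj
    exact not_lt.2 (hg (k+1+j) (by omega) (by omega)))]
  simp; omega

theorem pvMem_dropWhile_of_neg {α : Type} (p : α → Bool) (l : List α) (x : α)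
    (hx : x ∈ l) (hp : p x = false) : x ∈ l.dropWhile p := by
  induction l with
  | nil => simp at hx
  | cons a l ih =>
    rw [List.dropWhile_cons]
    by_cases ha : p a = true
    · rw [if_pos ha]
      rcases List.mem_cons.1 hx with rfl | hx'
      · rw [hp] at ha; cases ha
      · exact ih hx'
    · rw [if_neg ha]; exact hx

theorem pvDropWhile_shape {α : Type} (p : α → Bool) (l : List α) :
    l.dropWhile p = [] ∨ ∃ h0 t, l.dropWhile p = h0 :: t ∧ p h0 = false := by
  induction l with
  | nil => left; simp
  | cons a l ih =>
    by_cases h : p a = true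
    · rw [List.dropWhile_cons, if_pos h]; exact ih
    · right; exact ⟨a, l, by rw [List.dropWhile_cons, if_neg h], by simpa using h⟩

theorem pvPop_length (prices : List Int) (i : Nat) :
    ∀ stk answer, ((aPop prices i answer stk).1).length = answer.length := by
  intro stk
  induction stk with
  | nil => intro answer; simp [aPop]
  | cons t rest ih =>
    intro answer
    by_cases h : prices.getD i 0 < prices.getD t 0
    · simp only [aPop, if_pos h]; rw [ih]; simp
    · simp only [aPop, if_neg h]

theorem pvPop_snd (prices : List Int) (i : Nat) :
    ∀ stk answer, (aPop prices i answer stk).2 =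
      stk.dropWhile (fun k => decide (prices.getD i 0 < prices.getD k 0)) := by
  intro stk
  induction stk with
  | nil => intro answer; simp [aPop]
  | cons t rest ih =>
    intro answer
    by_cases h : prices.getD i 0 < prices.getD t 0
    · rw [List.dropWhile_cons, if_pos (by simpa using h)]
      simp only [aPop, if_pos h]
      exact ih _
    · rw [List.dropWhile_cons, if_neg (by simpa using h)]
      simp only [aPop, if_neg h]

theorem pvPop_fst (prices : List Int) (i : Nat) :
    ∀ stk answer, stk.Nodup → (∀ k ∈ stk, k < answer.length) → ∀ k,
      ((aPop prices i answer stk).1).getD k 0 =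
        if k ∈ stk.takeWhile (fun k => decide (prices.getD i 0 < prices.getD k 0))
        then (i : Int) - (k : Int) else answer.getD k 0 := by
  intro stk
  induction stk with
  | nil => intro answer _ _ k; simp [aPop]
  | cons t rest ih =>
    intro answer hnd hbd k
    by_cases h : prices.getD i 0 < prices.getD t 0
    · rw [List.takeWhile_cons_of_pos (by simpa using h)]
      simp only [aPop, if_pos h]
      rw [ih _ (List.nodup_cons.1 hnd).2
        (fun x hx => by rw [List.length_set]; exact hbd x (by simp [hx])) k]
      by_cases hmem : k ∈ rest.takeWhile (fun k => decide (prices.getD i 0 < prices.getD k 0))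
      · rw [if_pos hmem, if_pos (List.mem_cons.2 (Or.inr hmem))]
      · rw [if_neg hmem]
        rcases eq_or_ne k t with rfl | hne
        · rw [if_pos (List.mem_cons.2 (Or.inl rfl))]
          rw [List.getD_eq_getElem?_getD, List.getElem?_set_self (hbd k (by simp))]
          rfl
        · rw [if_neg (fun hc => by
            rcases List.mem_cons.1 hc with rfl | hc'
            exacts [hne rfl, hmem hc'])]
          rw [List.getD_eq_getElem?_getD, List.getElem?_set_ne (Ne.symm hne),
            ← List.getD_eq_getElem?_getD]
    · rw [List.takeWhile_cons_of_neg (by simpa using h)]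
      simp only [aPop, if_neg h]
      simp

theorem pvGood_mono (prices : List Int) (i i' k : Nat) (h : i' ≤ i)
    (hg : goodUpto prices i k) : goodUpto prices i' k :=
  fun j hj hj' => hg j hj (lt_of_lt_of_le hj' h)

-- the main step: one outer-loop iteration preserves the invariant
theorem pvInv_step (prices : List Int) (i : Nat) (hi : i < prices.length)
    (answer : List Int) (stk : List Nat) (h : StkInv prices i (answer, stk)) :
    StkInv prices (i + 1) (aStep prices (answer, stk) i) := by
  obtain ⟨hpw, hmem, hlen, hans⟩ := h
  simp only at hpw hmem hlen hans
  set pred := (fun k => decide (prices.getD i 0 < prices.getD k 0)) with hpred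
  have hnd : stk.Nodup := hpw.imp (fun h => ne_of_gt h)
  have hbd : ∀ k ∈ stk, k < answer.length := by
    intro k hk; rw [hlen]; exact lt_trans ((hmem k).1 hk).1 hi
  have hsnd := pvPop_snd prices i stk answer
  have hfst := pvPop_fst prices i stk answer hnd hbd
  have hdw_mem : ∀ k ∈ stk.dropWhile pred, k ∈ stk := by
    intro k hk
    rw [← List.takeWhile_append_dropWhile (p := pred) (l := stk)]
    exact List.mem_append_right _ hk
  have hdisj : ∀ k ∈ stk.takeWhile pred, k ∉ stk.dropWhile pred := by
    intro k hk
    have hnd' := hnd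
    rw [← List.takeWhile_append_dropWhile (p := pred) (l := stk)] at hnd'
    exact (List.disjoint_of_nodup_append hnd') hk
  have hdw_pw : (stk.dropWhile pred).Pairwise (· > ·) :=
    hpw.sublist (List.dropWhile_sublist _)
  have hdw_le : ∀ k ∈ stk.dropWhile pred, prices.getD k 0 ≤ prices.getD i 0 := by
    intro k hk
    rcases pvDropWhile_shape pred stk with hnil | ⟨h0, t, hd, hph0⟩
    · rw [hnil] at hk; simp at hk
    · have hle0 : prices.getD h0 0 ≤ prices.getD i 0 := by
        simp only [hpred, decide_eq_false_iff_not, not_lt] at hph0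
        exact hph0
      rw [hd] at hk
      rcases List.mem_cons.1 hk with rfl | hk'
      · exact hle0
      · have hgt : h0 > k := by
          rw [hd] at hdw_pw
          exact (List.pairwise_cons.1 hdw_pw).1 k hk'
        have hkstk : k ∈ stk := hdw_mem k (by rw [hd]; exact List.mem_cons.2 (Or.inr hk'))
        have hh0stk : h0 ∈ stk := hdw_mem h0 (by rw [hd]; exact List.mem_cons.2 (Or.inl rfl))
        have hgk := (hmem k).1 hkstk
        have hh0i : h0 < i := ((hmem h0).1 hh0stk).1
        exact le_trans (hgk.2 h0 hgt hh0i) hle0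
  simp only [aStep]
  refine ⟨?_, ?_, ?_, ?_⟩
  · -- pairwise
    show (i :: (aPop prices i answer stk).2).Pairwise (· > ·)
    rw [hsnd]
    refine List.pairwise_cons.2 ⟨?_, hdw_pw⟩
    intro k hk
    exact ((hmem k).1 (hdw_mem k hk)).1
  · -- membership characterisation at i+1
    intro k
    show k ∈ i :: (aPop prices i answer stk).2 ↔ _
    rw [hsnd, List.mem_cons]
    constructor
    · rintro (rfl | hk)
      · exact ⟨Nat.lt_succ_self k, fun j hj hj' => absurd hj (by omega)⟩
      · have hkstk := hdw_mem k hk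
        have hgk := (hmem k).1 hkstk
        refine ⟨Nat.lt_succ_of_lt hgk.1, ?_⟩
        intro j hj hj'
        rcases Nat.lt_succ_iff_lt_or_eq.1 hj' with hji | rfl
        · exact hgk.2 j hj hji
        · exact hdw_le k hk
    · rintro ⟨hki, hgk⟩
      rcases Nat.lt_succ_iff_lt_or_eq.1 hki with hki' | rfl
      · right
        have hkstk : k ∈ stk :=
          (hmem k).2 ⟨hki', pvGood_mono prices (i+1) i k (Nat.le_succ i) hgk⟩
        refine pvMem_dropWhile_of_neg pred stk k hkstk ?_
        simp only [hpred, decide_eq_false_iff_not, not_lt]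
        exact hgk i hki' (Nat.lt_succ_self i)
      · left; rfl
  · show ((aPop prices i answer stk).1).length = prices.length
    rw [pvPop_length]; exact hlen
  · intro k hk
    show ((aPop prices i answer stk).1).getD k 0 = _
    rw [hfst k, hsnd]
    by_cases htw : k ∈ stk.takeWhile pred
    · rw [if_pos htw]
      have hkstk : k ∈ stk := by
        rw [← List.takeWhile_append_dropWhile (p := pred) (l := stk)]
        exact List.mem_append_left _ htw
      have hgk := (hmem k).1 hkstk
      have hklt : prices.getD i 0 < prices.getD k 0 := by
        have := List.mem_takeWhile_imp htw
        simpa [hpred] using this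
      have hcond : ¬ (k ∈ i :: stk.dropWhile pred ∨ i + 1 ≤ k) := by
        push_neg
        refine ⟨?_, by omega⟩
        simp only [List.mem_cons, not_or]
        exact ⟨by omega, hdisj k htw⟩
      rw [if_neg hcond]
      exact (pvFval_popped prices i k hgk.1 hi hgk.2 hklt).symm
    · rw [if_neg htw, hans k hk]
      by_cases hik : i ≤ k
      · rw [if_pos (Or.inr hik)]
        by_cases hki : k = i
        · rw [if_pos (Or.inl (List.mem_cons.2 (Or.inl hki)))]
        · rw [if_pos (Or.inr (by omega))]
      · by_cases hks : k ∈ stk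
        · have hdw : k ∈ stk.dropWhile pred := by
            have hks' := hks
            rw [← List.takeWhile_append_dropWhile (p := pred) (l := stk)] at hks'
            rcases List.mem_append.1 hks' with h1 | h2
            · exact absurd h1 htw
            · exact h2
          rw [if_pos (Or.inl hks), if_pos (Or.inl (List.mem_cons.2 (Or.inr hdw)))]
        · have hc1 : ¬ (k ∈ stk ∨ i ≤ k) := by push_neg; exact ⟨hks, by omega⟩
          have hc2 : ¬ (k ∈ i :: stk.dropWhile pred ∨ i + 1 ≤ k) := by
            push_neg
            refine ⟨?_, by omega⟩
            simp only [List.mem_cons, not_or]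
            exact ⟨by omega, fun hdw => hks (hdw_mem k hdw)⟩
          rw [if_neg hc1, if_neg hc2]

theorem pvInv_zero (prices : List Int) :
    StkInv prices 0
      ((List.range prices.length).map (fun k : Nat => ((prices.length : Int) - 1 - (k : Int))), []) := by
  refine ⟨List.Pairwise.nil, by simp, by simp, ?_⟩
  intro k hk
  rw [if_pos (Or.inr (Nat.zero_le k))]
  rw [List.getD_eq_getElem _ _ (by simpa using hk)]
  simp only [List.getElem_map, List.getElem_range]

theorem pvInv_fold (prices : List Int) (m : Nat) (hm : m ≤ prices.length) :
    StkInv prices m ((List.range m).foldl (aStep prices)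
      ((List.range prices.length).map (fun k : Nat => ((prices.length : Int) - 1 - (k : Int))), [])) := by
  induction m with
  | zero => simpa using pvInv_zero prices
  | succ m ih =>
    rw [List.range_succ, List.foldl_append]
    simp only [List.foldl_cons, List.foldl_nil]
    have h := ih (by omega)
    have := pvInv_step prices m (by omega) _ _ h
    exact this
  
theorem pvAlt_getD (prices : List Int) (k : Nat) (hk : k < prices.length) :
    (solution_alt prices).getD k 0 = fval prices k := by
  unfold solution_alt fval
  rw [List.getD_eq_getElem _ _ (by simpa using hk)]
  simp only [List.getElem_map, List.getElem_range]

-- ===== VERDICT (by name: the statement is the Claim_ definition above) =====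
theorem solution_spec : Claim_equal_solution := by
  intro prices _
  unfold Spec_solution
  have hsol : solution prices = ((List.range prices.length).foldl (aStep prices)
      ((List.range prices.length).map (fun k : Nat => ((prices.length : Int) - 1 - (k : Int))), [])).1 := rfl
  obtain ⟨_, hmem, hlen, hans⟩ := pvInv_fold prices prices.length (le_refl _)
  rw [hsol]
  apply List.ext_getElem
  · rw [hlen]; simp [solution_alt]
  · intro k hk1 hk2
    have hkn : k < prices.length := by rwa [hlen] at hk1
    rw [← List.getD_eq_getElem _ 0 hk1, ← List.getD_eq_getElem _ 0 hk2]
    rw [hans k hkn, pvAlt_getD prices k hkn]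
    by_cases hks : k ∈ ((List.range prices.length).foldl (aStep prices)
        ((List.range prices.length).map (fun k : Nat => ((prices.length : Int) - 1 - (k : Int))), [])).2
    · rw [if_pos (Or.inl hks)]
      exact (pvFval_survivor prices k hkn ((hmem k).1 hks).2).symm
    · rw [if_neg (by push_neg; exact ⟨hks, by omega⟩)]
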